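-- pv_equiv track=rewrite | github.com/john35452/GFG_Weekly_Coding_Contest | gfg-weekly-coding-contest-69/Optimal Array.py | optimalArray
-- ===== SOURCE A (Python) =====
-- from typing import List
--
-- def optimalArray(n : int, a : List[int]) -> List[int]:
--     # code here
--     left_sum = total_sum = 0
--     j = 0
--     ans = [0]*n
--     for i in range(n):
--         total_sum += a[i]
--         half = i // 2
--         if i % 2 == 0:
--             left_sum += a[j]
--             j += 1
--         ans[i] = a[half]*(half + 1) - left_sum + total_sum - left_sum - a[half] *(i - half)
--     return ans
-- ===== SOURCE B (Python) =====
-- from typing import List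
--
-- def optimalArray(n: int, a: List[int]) -> List[int]:
--     ans = []
--     for i in range(n):
--         half = i // 2
--         m = a[half]
--         cost = 0
--         for k in range(i + 1):
--             if k >= half:
--                 cost += a[k] - m
--             else:
--                 cost += m - a[k]
--         ans.append(cost)
--     return ans
-- ===== Notes on version B (the rewrite author's own statement) =====
-- stated objective: simpler
-- what changed: Each prefix cost is recomputed independently by a direct inner loop that splits by index at half (k>=half adds a[k]-m, k<half adds m-a[k]), replacing A's single pass that maintains running total_sum, left_sum and j with an algebraic formula.
import Mathlib
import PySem

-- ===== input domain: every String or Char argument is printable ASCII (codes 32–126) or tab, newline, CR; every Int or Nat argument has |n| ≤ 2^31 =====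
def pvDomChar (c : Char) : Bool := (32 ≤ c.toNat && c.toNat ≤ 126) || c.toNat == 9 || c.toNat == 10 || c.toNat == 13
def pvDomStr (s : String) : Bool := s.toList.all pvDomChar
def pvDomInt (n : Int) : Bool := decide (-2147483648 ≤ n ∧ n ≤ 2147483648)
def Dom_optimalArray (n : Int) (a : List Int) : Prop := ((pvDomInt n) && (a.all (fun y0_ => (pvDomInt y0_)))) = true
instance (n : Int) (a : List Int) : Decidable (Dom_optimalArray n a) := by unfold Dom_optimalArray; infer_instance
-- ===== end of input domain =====

-- B recomputes each prefix cost independently with a direct index-split inner loop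
-- (simpler, no running state) instead of A's single pass with running sums; equal return values.


-- ===== PORT A =====
def optimalArray (n : Int) (a : List Int) : List Int :=
  ((PySem.List.pyRange 0 n 1).foldl
    (fun (st : Int × Int × Int × List Int) i =>
      let left_sum := st.1
      let total_sum := st.2.1 + PySem.List.pyGetD a i 0
      let j := st.2.2.1
      let ans := st.2.2.2
      let half := PySem.Int.floordiv i 2
      let ls_j : Int × Int :=
        if PySem.Int.mod i 2 = 0 then (left_sum + PySem.List.pyGetD a j 0, j + 1)
        else (left_sum, j)
      let v := PySem.List.pyGetD a half 0 * (half + 1) - ls_j.1 + total_sum - ls_j.1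
                 - PySem.List.pyGetD a half 0 * (i - half)
      (ls_j.1, total_sum, ls_j.2, PySem.List.pySetD ans i v))
    (0, 0, 0, List.replicate n.toNat 0)).2.2.2

-- ===== PORT B =====
def optimalArray_alt (n : Int) (a : List Int) : List Int :=
  (PySem.List.pyRange 0 n 1).foldl
    (fun ans i =>
      let half := PySem.Int.floordiv i 2
      let m := PySem.List.pyGetD a half 0
      let cost := (PySem.List.pyRange 0 (i + 1) 1).foldl
        (fun c k =>
          if half ≤ k then c + (PySem.List.pyGetD a k 0 - m)
          else c + (m - PySem.List.pyGetD a k 0)) 0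
      ans ++ [cost]) []

-- ===== PRECONDITION & SPEC =====
-- Pre_: A (and B) raise IndexError when n exceeds len(a); exactly those inputs are excluded.
def Pre_optimalArray (n : Int) (a : List Int) : Prop := n ≤ (a.length : Int)
instance (n : Int) (a : List Int) : Decidable (Pre_optimalArray n a) := by
  unfold Pre_optimalArray; infer_instance
def pvWitness_optimalArray : Int × List Int := (3, [5, -2, 7])

def Spec_optimalArray (n : Int) (a : List Int) (out : List Int) : Prop := out = optimalArray_alt n a
instance (n : Int) (a : List Int) (out : List Int) : Decidable (Spec_optimalArray n a out) := by
  unfold Spec_optimalArray; infer_instance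

-- ===== CLAIM (what is proved, stated in full; the proofs are below) =====
def Claim_equal_optimalArray : Prop := ∀ (n : Int) (a : List Int), Dom_optimalArray n a → Pre_optimalArray n a → Spec_optimalArray n a (optimalArray n a)

-- ===== LEMMAS AND PROOFS =====

-- closed form of the i-th answer, shared target of both ports
def pvF (a : List Int) (k : Nat) : Int :=
  let half := k / 2
  let m := a.getD half 0
  m * ((half : Int) + 1) - 2 * (a.take (half + 1)).sum + (a.take (k + 1)).sum
    - m * ((k : Int) - (half : Int))

theorem pv_take_succ_sum (a : List Int) (m : Nat) :
    (a.take (m + 1)).sum = (a.take m).sum + a.getD m 0 := by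
  rw [List.take_add_one]
  simp [List.getD]
  cases a[m]? <;> simp

theorem pv_sum_getD (a : List Int) (m : Nat) :
    ((PySem.List.pyRange 0 m 1).map (fun j => PySem.List.pyGetD a j 0)).sum
      = (a.take m).sum := by
  induction m with
  | zero => simp
  | succ m ih =>
    have h : (0 : Int) ≤ (m : Int) := by positivity
    have : ((m : Int) + 1) = ((m + 1 : Nat) : Int) := by push_cast; ring
    rw [← this, PySem.List.pyRange_one_succ_right h, List.map_append, List.sum_append, ih,
      pv_take_succ_sum]
    simp

theorem pv_sum_sub_const (l : List Int) (g : Int → Int) (m : Int) :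
    (l.map (fun j => m - g j)).sum = l.length * m - (l.map g).sum := by
  induction l with
  | nil => simp
  | cons x xs ih => simp [ih]; ring

theorem pv_sum_const_sub (l : List Int) (g : Int → Int) (m : Int) :
    (l.map (fun j => g j - m)).sum = (l.map g).sum - l.length * m := by
  induction l with
  | nil => simp
  | cons x xs ih => simp [ih]; ring

theorem pv_floordiv_two (k : Nat) : PySem.Int.floordiv (k : Int) 2 = ((k / 2 : Nat) : Int) := by
  simp [PySem.Int.floordiv]
  rw [Int.fdiv_eq_ediv]; omega

theorem pv_mod_two (k : Nat) : PySem.Int.mod (k : Int) 2 = ((k % 2 : Nat) : Int) := by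
  simp [PySem.Int.mod]
  rw [Int.fmod_eq_emod]; omega

-- B's i-th element equals the closed form (needs k/2 < len so that a[half] is a real element)
theorem pv_B_elem (a : List Int) (k : Nat) :
    (fun ans i =>
      let half := PySem.Int.floordiv i 2
      let m := PySem.List.pyGetD a half 0
      let cost := (PySem.List.pyRange 0 (i + 1) 1).foldl
        (fun c j =>
          if half ≤ j then c + (PySem.List.pyGetD a j 0 - m)
          else c + (m - PySem.List.pyGetD a j 0)) 0
      ans ++ [cost]) [] (k : Int) = [pvF a k] := by
  simp only [List.nil_append, List.cons.injEq, and_true]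
  rw [pv_floordiv_two]
  have hfun : (fun (c j : Int) =>
      if ((k / 2 : Nat) : Int) ≤ j then c + (PySem.List.pyGetD a j 0 - PySem.List.pyGetD a ((k / 2 : Nat) : Int) 0)
      else c + (PySem.List.pyGetD a ((k / 2 : Nat) : Int) 0 - PySem.List.pyGetD a j 0))
      = (fun (c j : Int) => c + (if ((k / 2 : Nat) : Int) ≤ j
          then PySem.List.pyGetD a j 0 - PySem.List.pyGetD a ((k / 2 : Nat) : Int) 0
          else PySem.List.pyGetD a ((k / 2 : Nat) : Int) 0 - PySem.List.pyGetD a j 0)) := by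
    funext c j; split <;> rfl
  rw [hfun, PySem.List.foldl_add]
  have hcast : (k : Int) + 1 = ((k + 1 : Nat) : Int) := by push_cast; ring
  have hsplit : PySem.List.pyRange 0 ((k + 1 : Nat) : Int) 1
      = PySem.List.pyRange 0 ((k / 2 : Nat) : Int) 1
        ++ PySem.List.pyRange ((k / 2 : Nat) : Int) ((k + 1 : Nat) : Int) 1 := by
    rw [← PySem.List.pyRange_one_append 0 ((k / 2 : Nat) : Int) ((k + 1 : Nat) : Int)
      (by positivity) (by exact_mod_cast Nat.le_of_lt (by omega))]
  rw [hcast, hsplit, List.map_append, List.sum_append]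
  have hL : (PySem.List.pyRange 0 ((k / 2 : Nat) : Int) 1).map (fun j =>
      if ((k / 2 : Nat) : Int) ≤ j
        then PySem.List.pyGetD a j 0 - PySem.List.pyGetD a ((k / 2 : Nat) : Int) 0
        else PySem.List.pyGetD a ((k / 2 : Nat) : Int) 0 - PySem.List.pyGetD a j 0)
      = (PySem.List.pyRange 0 ((k / 2 : Nat) : Int) 1).map (fun j =>
          PySem.List.pyGetD a ((k / 2 : Nat) : Int) 0 - PySem.List.pyGetD a j 0) := by
    apply List.map_congr_left
    intro j hj
    rw [PySem.List.mem_pyRange_one] at hj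
    rw [if_neg (by omega)]
  have hR : (PySem.List.pyRange ((k / 2 : Nat) : Int) ((k + 1 : Nat) : Int) 1).map (fun j =>
      if ((k / 2 : Nat) : Int) ≤ j
        then PySem.List.pyGetD a j 0 - PySem.List.pyGetD a ((k / 2 : Nat) : Int) 0
        else PySem.List.pyGetD a ((k / 2 : Nat) : Int) 0 - PySem.List.pyGetD a j 0)
      = (PySem.List.pyRange ((k / 2 : Nat) : Int) ((k + 1 : Nat) : Int) 1).map (fun j =>
          PySem.List.pyGetD a j 0 - PySem.List.pyGetD a ((k / 2 : Nat) : Int) 0) := by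
    apply List.map_congr_left
    intro j hj
    rw [PySem.List.mem_pyRange_one] at hj
    rw [if_pos hj.1]
  rw [hL, hR, pv_sum_sub_const, pv_sum_const_sub]
  have hSfull := pv_sum_getD a (k + 1)
  rw [hsplit, List.map_append, List.sum_append] at hSfull
  have hSL := pv_sum_getD a (k / 2)
  rw [hSL] at hSfull ⊢
  have hRsum : ((PySem.List.pyRange ((k / 2 : Nat) : Int) ((k + 1 : Nat) : Int) 1).map
      (fun j => PySem.List.pyGetD a j 0)).sum = (a.take (k + 1)).sum - (a.take (k / 2)).sum := by
    omega
  rw [hRsum]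
  have hlenL : (PySem.List.pyRange 0 ((k / 2 : Nat) : Int) 1).length = k / 2 := by
    rw [PySem.List.length_pyRange_one]; omega
  have hlenR : (PySem.List.pyRange ((k / 2 : Nat) : Int) ((k + 1 : Nat) : Int) 1).length
      = k + 1 - k / 2 := by
    rw [PySem.List.length_pyRange_one]; omega
  rw [hlenL, hlenR]
  rw [PySem.List.pyGetD_natCast]
  unfold pvF
  simp only []
  rw [pv_take_succ_sum a (k / 2)]
  have hkh : (((k + 1 - k / 2 : Nat)) : Int) = (k : Int) + 1 - ((k / 2 : Nat) : Int) := by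
    push_cast [Nat.cast_sub (by omega : k / 2 ≤ k + 1)]; ring
  rw [hkh]
  ring

theorem pv_set_mid {α : Type} (l1 l2 : List α) (x v : α) :
    (l1 ++ x :: l2).set l1.length v = l1 ++ v :: l2 := by
  induction l1 with
  | nil => simp
  | cons y ys ih => simp [ih]

-- invariant of A's loop
theorem pv_A_inv (a : List Int) (N m : Nat) (hm : m ≤ N) :
    (PySem.List.pyRange 0 (m : Int) 1).foldl
      (fun (st : Int × Int × Int × List Int) i =>
        let left_sum := st.1
        let total_sum := st.2.1 + PySem.List.pyGetD a i 0
        let j := st.2.2.1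
        let ans := st.2.2.2
        let half := PySem.Int.floordiv i 2
        let ls_j : Int × Int :=
          if PySem.Int.mod i 2 = 0 then (left_sum + PySem.List.pyGetD a j 0, j + 1)
          else (left_sum, j)
        let v := PySem.List.pyGetD a half 0 * (half + 1) - ls_j.1 + total_sum - ls_j.1
                   - PySem.List.pyGetD a half 0 * (i - half)
        (ls_j.1, total_sum, ls_j.2, PySem.List.pySetD ans i v))
      (0, 0, 0, List.replicate N 0)
    = ((a.take ((m + 1) / 2)).sum, (a.take m).sum, (((m + 1) / 2 : Nat) : Int),
       (List.range m).map (pvF a) ++ List.replicate (N - m) 0) := by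
  induction m with
  | zero =>
    simp [PySem.List.pyRange_one_eq_nil]
  | succ m ih =>
    have hm' : m ≤ N := by omega
    have h0 : (0 : Int) ≤ (m : Int) := by positivity
    have hcast : ((m + 1 : Nat) : Int) = (m : Int) + 1 := by push_cast; ring
    rw [hcast, PySem.List.pyRange_one_succ_right h0, List.foldl_append, ih hm']
    simp only [List.foldl_cons, List.foldl_nil, pv_floordiv_two, pv_mod_two,
      PySem.List.pyGetD_natCast, PySem.List.pySetD_natCast]
    have hset : (((List.range m).map (pvF a) ++ List.replicate (N - m) 0).set m (pvF a m))
        = (List.range (m + 1)).map (pvF a) ++ List.replicate (N - (m + 1)) 0 := by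
      have hrep : List.replicate (N - m) (0 : Int)
          = 0 :: List.replicate (N - (m + 1)) 0 := by
        rw [show N - m = (N - (m + 1)) + 1 by omega, List.replicate_succ]
      have hlen : ((List.range m).map (pvF a)).length = m := by simp
      have hmid := pv_set_mid ((List.range m).map (pvF a))
        (List.replicate (N - (m + 1)) (0 : Int)) 0 (pvF a m)
      rw [hlen] at hmid
      rw [hrep, hmid, List.range_succ, List.map_append]
      simp
    by_cases hpar : m % 2 = 0
    · rw [if_pos (by exact_mod_cast congrArg (Nat.cast : Nat → Int) hpar)]
      have h1 : (m + 1) / 2 = m / 2 := by omega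
      have h2 : (m + 2) / 2 = m / 2 + 1 := by omega
      have hv : pvF a m = a.getD (m / 2) 0 * (((m / 2 : Nat) : Int) + 1)
          - ((a.take ((m + 1) / 2)).sum + a.getD ((m + 1) / 2) 0)
          + ((a.take m).sum + a.getD m 0)
          - ((a.take ((m + 1) / 2)).sum + a.getD ((m + 1) / 2) 0)
          - a.getD (m / 2) 0 * ((m : Int) - ((m / 2 : Nat) : Int)) := by
        unfold pvF
        simp only []
        rw [h1, ← pv_take_succ_sum a (m / 2), ← pv_take_succ_sum a m]
        ring
      rw [← hv, hset]
      simp only [Prod.mk.injEq]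
      refine ⟨?_, ?_, ?_, trivial⟩
      · rw [h1, h2, pv_take_succ_sum]
      · rw [pv_take_succ_sum]
      · rw [h1, h2]; push_cast; ring
    · rw [if_neg (by
        intro hc
        exact hpar (by exact_mod_cast hc))]
      have h1 : (m + 1) / 2 = m / 2 + 1 := by omega
      have h2 : (m + 2) / 2 = m / 2 + 1 := by omega
      have hv : pvF a m = a.getD (m / 2) 0 * (((m / 2 : Nat) : Int) + 1)
          - (a.take ((m + 1) / 2)).sum
          + ((a.take m).sum + a.getD m 0)
          - (a.take ((m + 1) / 2)).sum
          - a.getD (m / 2) 0 * ((m : Int) - ((m / 2 : Nat) : Int)) := by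
        unfold pvF
        simp only []
        rw [h1, ← pv_take_succ_sum a m]
        ring
      rw [← hv, hset]
      simp only [Prod.mk.injEq]
      refine ⟨?_, ?_, ?_, trivial⟩
      · rw [h1, h2]
      · rw [pv_take_succ_sum]
      · rw [h1, h2]

-- B's loop over range(n) appends pvF a k for each k
theorem pv_B_inv (a : List Int) (M : Nat) (hM : M ≤ a.length) :
    (PySem.List.pyRange 0 (M : Int) 1).foldl
      (fun ans i =>
        let half := PySem.Int.floordiv i 2
        let m := PySem.List.pyGetD a half 0
        let cost := (PySem.List.pyRange 0 (i + 1) 1).foldl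
          (fun c k =>
            if half ≤ k then c + (PySem.List.pyGetD a k 0 - m)
            else c + (m - PySem.List.pyGetD a k 0)) 0
        ans ++ [cost]) []
    = (List.range M).map (pvF a) := by
  induction M with
  | zero => simp [PySem.List.pyRange_one_eq_nil]
  | succ m ih =>
    have h0 : (0 : Int) ≤ (m : Int) := by positivity
    have hcast : ((m + 1 : Nat) : Int) = (m : Int) + 1 := by push_cast; ring
    rw [hcast, PySem.List.pyRange_one_succ_right h0, List.foldl_append,
      ih (by omega), List.foldl_cons, List.foldl_nil]
    have hb := pv_B_elem a m
    rw [List.range_succ, List.map_append]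
    show _ = (List.range m).map (pvF a) ++ [pvF a m]
    rw [← hb]
    rfl

-- ===== VERDICT (by name: the statement is the Claim_ definition above) =====
theorem optimalArray_spec : Claim_equal_optimalArray := by
  intro n a _ hpre
  unfold Spec_optimalArray optimalArray optimalArray_alt
  unfold Pre_optimalArray at hpre
  by_cases hn : 0 ≤ n
  · have hN : n = ((n.toNat : Nat) : Int) := (Int.toNat_of_nonneg hn).symm
    have hlen : n.toNat ≤ a.length := by omega
    rw [hN, Int.toNat_natCast, pv_A_inv a n.toNat n.toNat (le_refl _),
      pv_B_inv a n.toNat hlen]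
    simp
  · have h1 : n ≤ 0 := by omega
    rw [PySem.List.pyRange_one_eq_nil h1, Int.toNat_of_nonpos h1]
    simp
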